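-- pv_equiv track=rewrite | github.com/hanium-vector-db/backend_fastapi | src/services/enhanced_internal_db_service.py | _infer_enhanced_schema
-- ===== SOURCE A (Python) =====
-- def _infer_enhanced_schema(columns, id_col=None, title_col=None, text_cols=None):
--     """향상된 스키마 추론"""
--     TITLE_CANDIDATES = {"title","name","term","keyword","subject","heading"}
--     TEXT_CANDIDATES = {"body","content","description","details","text","summary","note","notes","paragraph","article"}
--     ID_CANDIDATES = {"id","pk","gid","uid"}
--
--     def pick(cands):
--         for c in columns:
--             if c.lower() in cands:
--                 return c
--         return None
--
--     _id = id_col or pick(ID_CANDIDATES) or (columns[0] if columns else None)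
--     _title = title_col or pick(TITLE_CANDIDATES)
--     _texts = text_cols or [c for c in columns if c.lower() in TEXT_CANDIDATES]
--
--     if not _texts:
--         _texts = [c for c in columns if c != _title]
--
--     return _id, _title, _texts, columns
-- ===== SOURCE B (Python) =====
-- def _infer_enhanced_schema(columns, id_col=None, title_col=None, text_cols=None):
--     """Single pass over columns instead of three separate scans."""
--     TITLE_CANDIDATES = {"title","name","term","keyword","subject","heading"}
--     TEXT_CANDIDATES = {"body","content","description","details","text","summary","note","notes","paragraph","article"}
--     ID_CANDIDATES = {"id","pk","gid","uid"}
--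
--     found_id = None
--     found_title = None
--     found_texts = []
--     for c in columns:
--         lc = c.lower()
--         if found_id is None and lc in ID_CANDIDATES:
--             found_id = c
--         if found_title is None and lc in TITLE_CANDIDATES:
--             found_title = c
--         if lc in TEXT_CANDIDATES:
--             found_texts.append(c)
--
--     _id = id_col or found_id or (columns[0] if columns else None)
--     _title = title_col or found_title
--     _texts = text_cols or found_texts or [c for c in columns if c != _title]
--     return _id, _title, _texts, columns
-- ===== Notes on version B (the rewrite author's own statement) =====
-- stated objective: alternative
-- what changed: Replaces the pick helper's two candidate scans plus a filter comprehension (three passes over columns) with one fold that simultaneously tracks the first id candidate, the first title candidate, and all text candidates, applying the truthiness overrides afterwards.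
import Mathlib
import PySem

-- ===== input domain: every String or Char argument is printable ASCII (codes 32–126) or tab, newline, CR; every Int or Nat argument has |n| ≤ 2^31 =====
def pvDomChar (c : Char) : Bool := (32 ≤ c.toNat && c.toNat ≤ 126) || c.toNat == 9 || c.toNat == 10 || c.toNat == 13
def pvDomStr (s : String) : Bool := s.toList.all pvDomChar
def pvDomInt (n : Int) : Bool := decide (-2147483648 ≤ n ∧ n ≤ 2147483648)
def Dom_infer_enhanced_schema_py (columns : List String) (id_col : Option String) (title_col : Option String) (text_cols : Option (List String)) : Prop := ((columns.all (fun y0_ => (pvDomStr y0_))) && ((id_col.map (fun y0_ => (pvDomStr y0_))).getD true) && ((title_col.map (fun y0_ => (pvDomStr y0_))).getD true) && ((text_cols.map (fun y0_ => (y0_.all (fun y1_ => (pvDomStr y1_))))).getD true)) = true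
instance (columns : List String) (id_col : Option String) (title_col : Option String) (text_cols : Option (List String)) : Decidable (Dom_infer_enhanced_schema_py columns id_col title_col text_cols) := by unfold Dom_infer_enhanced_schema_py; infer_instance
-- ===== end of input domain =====

-- B: one fold over columns replacing A's three scans (pick helper twice + a filter); equal return value proved.


-- ===== PORT A =====
-- shared constant candidate sets and Python `or`/truthiness helpers
def TITLE_CANDIDATES : List String := ["title","name","term","keyword","subject","heading"]
def TEXT_CANDIDATES : List String := ["body","content","description","details","text","summary","note","notes","paragraph","article"]
def ID_CANDIDATES : List String := ["id","pk","gid","uid"]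

-- Python `a or b` on Optional[str]: None and "" are falsy
def pyOrStr (a b : Option String) : Option String :=
  match a with
  | some s => if s = "" then b else some s
  | none => b

-- Python `a or b` where a : Optional[list[str]], b : list[str]: None and [] are falsy
def pyOrList (a : Option (List String)) (b : List String) : List String :=
  match a with
  | some l => if l = [] then b else l
  | none => b

-- the inner helper `pick`: first column whose lowercase is in cands, else None
def pick (columns : List String) (cands : List String) : Option String :=
  match columns with
  | [] => none
  | c :: rest => if cands.contains (PySem.Str.lower c) then some c else pick rest cands

def infer_enhanced_schema_py (columns : List String) (id_col : Option String) (title_col : Option String) (text_cols : Option (List String)) : Option String × Option String × List String × List String :=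
  let _id := pyOrStr (pyOrStr id_col (pick columns ID_CANDIDATES)) columns.head?
  let _title := pyOrStr title_col (pick columns TITLE_CANDIDATES)
  let _texts0 := pyOrList text_cols (columns.filter (fun c => TEXT_CANDIDATES.contains (PySem.Str.lower c)))
  let _texts := if _texts0 = [] then columns.filter (fun c => some c != _title) else _texts0
  (_id, _title, _texts, columns)

-- ===== PORT B =====
-- one pass: first id candidate, first title candidate, all text candidates
def bStep (st : Option String × Option String × List String) (c : String) : Option String × Option String × List String :=
  let lc := PySem.Str.lower c
  (if st.1.isNone && ID_CANDIDATES.contains lc then some c else st.1,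
   if st.2.1.isNone && TITLE_CANDIDATES.contains lc then some c else st.2.1,
   if TEXT_CANDIDATES.contains lc then st.2.2 ++ [c] else st.2.2)

-- Python `l or b` on lists: [] is falsy
def listOr (l b : List String) : List String := if l = [] then b else l

def infer_enhanced_schema_py_alt (columns : List String) (id_col : Option String) (title_col : Option String) (text_cols : Option (List String)) : Option String × Option String × List String × List String :=
  let st := columns.foldl bStep (none, none, [])
  let _id := pyOrStr (pyOrStr id_col st.1) columns.head?
  let _title := pyOrStr title_col st.2.1
  let _texts := listOr (pyOrList text_cols st.2.2) (columns.filter (fun c => some c != _title))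
  (_id, _title, _texts, columns)

-- ===== PRECONDITION & SPEC =====
def Spec_infer_enhanced_schema_py (columns : List String) (id_col : Option String) (title_col : Option String) (text_cols : Option (List String)) (out : Option String × Option String × List String × List String) : Prop := out = infer_enhanced_schema_py_alt columns id_col title_col text_cols
instance (columns : List String) (id_col : Option String) (title_col : Option String) (text_cols : Option (List String)) (out : Option String × Option String × List String × List String) : Decidable (Spec_infer_enhanced_schema_py columns id_col title_col text_cols out) := by unfold Spec_infer_enhanced_schema_py; infer_instance

-- ===== CLAIM (what is proved, stated in full; the proofs are below) =====
def Claim_equal_infer_enhanced_schema_py : Prop := ∀ (columns : List String) (id_col : Option String) (title_col : Option String) (text_cols : Option (List String)), Dom_infer_enhanced_schema_py columns id_col title_col text_cols → Spec_infer_enhanced_schema_py columns id_col title_col text_cols (infer_enhanced_schema_py columns id_col title_col text_cols)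

-- ===== LEMMAS AND PROOFS =====
-- the fold from any starting state: id/title keep an already-found value, texts extend in order
theorem bFold_spec (cols : List String) : ∀ (a b : Option String) (l : List String),
    cols.foldl bStep (a, b, l) =
      (a.or (pick cols ID_CANDIDATES), b.or (pick cols TITLE_CANDIDATES),
       l ++ cols.filter (fun c => TEXT_CANDIDATES.contains (PySem.Str.lower c))) := by
  induction cols with
  | nil => intro a b l; simp [pick]
  | cons c rest ih =>
    intro a b l
    simp only [List.foldl_cons, bStep, pick, List.filter_cons, ih]
    cases a <;> cases b <;>
      by_cases h1 : PySem.Str.lower c ∈ ID_CANDIDATES <;>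
      by_cases h2 : PySem.Str.lower c ∈ TITLE_CANDIDATES <;>
      by_cases h3 : PySem.Str.lower c ∈ TEXT_CANDIDATES <;>
      simp [h1, h2, h3, Option.or]

-- ===== VERDICT (by name: the statement is the Claim_ definition above) =====
theorem infer_enhanced_schema_py_spec : Claim_equal_infer_enhanced_schema_py := by
  intro columns id_col title_col text_cols _
  unfold Spec_infer_enhanced_schema_py infer_enhanced_schema_py infer_enhanced_schema_py_alt
  simp [bFold_spec, listOr]
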